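-- pv_equiv track=rewrite | github.com/Icosa2050/brandname-generator | src/brandpipe/pipeline.py | _canonical_web_search_order
-- ===== SOURCE A (Python) =====
-- def _cfg_str(raw: object, default: str) -> str:
--     if raw is None:
--         return default
--     value = str(raw).strip()
--     return value if value else default
--
-- def _canonical_web_search_order(raw: object, default: str = "serper,brave") -> str:
--     order: list[str] = []
--     tokens = [part.strip().lower() for part in _cfg_str(raw, default).split(",") if part.strip()]
--     for token in tokens:
--         if token in {"serper", "brave"} and token not in order:
--             order.append(token)
--     if "serper" in order:
--         order = ["serper", *[item for item in order if item != "serper"]]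
--     if not order:
--         return default
--     return ",".join(order)
-- ===== SOURCE B (Python) =====
-- def _cfg_str(raw: object, default: str) -> str:
--     if raw is None:
--         return default
--     value = str(raw).strip()
--     return value if value else default
--
-- def _canonical_web_search_order(raw: object, default: str = "serper,brave") -> str:
--     parts = [p.strip().lower() for p in _cfg_str(raw, default).split(",") if p.strip()]
--     result = []
--     if "serper" in parts:
--         result.append("serper")
--     if "brave" in parts:
--         result.append("brave")
--     return ",".join(result) if result else default
-- ===== Notes on version B (the rewrite author's own statement) =====
-- stated objective: simpler
-- what changed: The dedup-accumulating loop plus the conditional serper-to-front reordering are replaced by two membership tests and assembly of the result in fixed canonical order, exploiting that the output depends only on which of the two valid tokens occur.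
import Mathlib
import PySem

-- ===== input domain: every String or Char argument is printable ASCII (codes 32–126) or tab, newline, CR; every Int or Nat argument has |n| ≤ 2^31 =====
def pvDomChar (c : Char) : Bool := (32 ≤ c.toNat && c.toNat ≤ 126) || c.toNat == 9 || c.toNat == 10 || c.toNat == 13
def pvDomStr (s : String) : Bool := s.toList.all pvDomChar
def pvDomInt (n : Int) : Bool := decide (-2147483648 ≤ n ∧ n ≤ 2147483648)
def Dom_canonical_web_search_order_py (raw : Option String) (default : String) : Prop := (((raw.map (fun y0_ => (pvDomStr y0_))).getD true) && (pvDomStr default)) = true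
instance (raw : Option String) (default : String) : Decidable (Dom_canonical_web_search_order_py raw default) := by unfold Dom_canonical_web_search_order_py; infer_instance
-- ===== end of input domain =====

-- B replaces A's dedup-accumulating loop and serper-to-front reordering by two
-- membership tests and fixed-order assembly (objective: simpler).

-- ===== PORT A =====
def cfg_str (raw : Option String) (default : String) : String :=
  match raw with
  | none => default
  | some r =>
    let value := PySem.Str.strip r
    if value = "" then default else value

-- s.split(",") with the nonempty separator ",": PySem.Str.split? is exact and
-- always `some` here, so `.getD []` never fires.
def pvTokens (raw : Option String) (default : String) : List String :=
  (((PySem.Str.split? (cfg_str raw default) ",").getD []).filter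
      (fun part => PySem.Str.strip part != "")).map
    (fun part => PySem.Str.lower (PySem.Str.strip part))

def pvLoopA (tokens : List String) (order : List String) : List String :=
  tokens.foldl
    (fun order token =>
      if (token == "serper" || token == "brave") && !(order.contains token) then
        order ++ [token]
      else order) order

def canonical_web_search_order_py (raw : Option String) (default : String) : String :=
  let tokens := pvTokens raw default
  let order := pvLoopA tokens []
  let order := if order.contains "serper" then
      "serper" :: order.filter (fun item => item != "serper")
    else order
  if order = [] then default else PySem.Str.join "," order

-- ===== PORT B =====
def canonical_web_search_order_py_alt (raw : Option String) (default : String) : String :=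
  let parts := pvTokens raw default
  let result : List String :=
    (if parts.contains "serper" then ["serper"] else []) ++
    (if parts.contains "brave" then ["brave"] else [])
  if result = [] then default else PySem.Str.join "," result

-- ===== PRECONDITION & SPEC =====
def Spec_canonical_web_search_order_py (raw : Option String) (default : String) (out : String) : Prop := out = canonical_web_search_order_py_alt raw default
instance (raw : Option String) (default : String) (out : String) : Decidable (Spec_canonical_web_search_order_py raw default out) := by unfold Spec_canonical_web_search_order_py; infer_instance

-- ===== CLAIM (what is proved, stated in full; the proofs are below) =====
def Claim_equal_canonical_web_search_order_py : Prop := ∀ (raw : Option String) (default : String), Dom_canonical_web_search_order_py raw default → Spec_canonical_web_search_order_py raw default (canonical_web_search_order_py raw default)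

-- ===== LEMMAS AND PROOFS =====

-- A's post-loop reordering, as a function of the loop result.
def pvFinA (order : List String) : List String :=
  if order.contains "serper" then
    "serper" :: order.filter (fun item => item != "serper")
  else order

-- B's canonical assembly from the two membership booleans.
def pvFinB (s b : Bool) : List String :=
  (if s then ["serper"] else []) ++ (if b then ["brave"] else [])

lemma pvLoopA_inv (tokens acc : List String) (hnd : acc.Nodup)
    (hsub : ∀ x ∈ acc, x = "serper" ∨ x = "brave") :
    pvFinA (pvLoopA tokens acc) =
      pvFinB ((acc ++ tokens).contains "serper") ((acc ++ tokens).contains "brave") := by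
  induction tokens generalizing acc with
  | nil =>
    simp only [List.append_nil]
    -- acc is nodup with elements among {"serper","brave"}: at most these five shapes
    match acc, hnd, hsub with
    | [], _, _ => decide
    | [x], hnd, hsub =>
      rcases hsub x (by simp) with h | h <;> subst h <;> decide
    | [x, y], hnd, hsub =>
      have hx := hsub x (by simp); have hy := hsub y (by simp)
      have hxy : x ≠ y := by simp [List.nodup_cons] at hnd; tauto
      rcases hx with h | h <;> rcases hy with h' | h' <;> subst h <;> subst h' <;>
        first | (exact absurd rfl hxy) | decide
    | x :: y :: z :: rest, hnd, hsub =>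
      have hx := hsub x (by simp); have hy := hsub y (by simp)
      have hz := hsub z (by simp)
      simp [List.nodup_cons] at hnd
      rcases hx with h | h <;> rcases hy with h' | h' <;> rcases hz with h'' | h'' <;>
        subst h <;> subst h' <;> subst h'' <;> tauto
  | cons t ts ih =>
    have step : pvLoopA (t :: ts) acc =
        pvLoopA ts (if (t == "serper" || t == "brave") && !(acc.contains t) then acc ++ [t] else acc) := rfl
    rw [step]
    by_cases hv : ((t == "serper" || t == "brave") && !(acc.contains t)) = true
    · rw [if_pos hv]
      simp only [Bool.and_eq_true, Bool.not_eq_true', List.contains_eq_mem,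
        decide_eq_false_iff_not, Bool.or_eq_true, beq_iff_eq] at hv
      have hnd' : (acc ++ [t]).Nodup := by
        refine List.Nodup.append hnd (List.nodup_singleton t) ?_
        intro a ha hb
        simp only [List.mem_singleton] at hb
        exact hv.2 (hb ▸ ha)
      have hsub' : ∀ x ∈ acc ++ [t], x = "serper" ∨ x = "brave" := by
        intro x hx
        rcases List.mem_append.mp hx with h | h
        · exact hsub x h
        · simp only [List.mem_singleton] at h; subst h; exact hv.1
      have hstep := ih (acc ++ [t]) hnd' hsub'
      simp only [List.append_assoc, List.singleton_append] at hstep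
      exact hstep
    · rw [if_neg hv]
      simp only [Bool.and_eq_true, Bool.not_eq_true', List.contains_eq_mem,
        decide_eq_false_iff_not, Bool.or_eq_true, beq_iff_eq, not_and_or, not_not] at hv
      have hcont : ∀ x, x = "serper" ∨ x = "brave" →
          (acc ++ ts).contains x = (acc ++ t :: ts).contains x := by
        intro x hx
        simp only [List.contains_eq_mem, decide_eq_decide, List.mem_append, List.mem_cons]
        constructor
        · tauto
        · rintro (h | h | h)
          · tauto
          · subst h
            rcases hv with hv | hv
            · exact absurd hx hv
            · exact Or.inl hv
          · tauto
      rw [← hcont "serper" (Or.inl rfl), ← hcont "brave" (Or.inr rfl)]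
      exact ih acc hnd hsub

-- ===== VERDICT (by name: the statement is the Claim_ definition above) =====
theorem canonical_web_search_order_py_spec : Claim_equal_canonical_web_search_order_py := by
  intro raw default _
  unfold Spec_canonical_web_search_order_py
  have h := pvLoopA_inv (pvTokens raw default) [] (by simp) (by simp)
  simp only [List.nil_append] at h
  show (if pvFinA (pvLoopA (pvTokens raw default) []) = [] then default
        else PySem.Str.join "," (pvFinA (pvLoopA (pvTokens raw default) []))) =
       (if pvFinB ((pvTokens raw default).contains "serper")
            ((pvTokens raw default).contains "brave") = [] then default
        else PySem.Str.join ","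
          (pvFinB ((pvTokens raw default).contains "serper")
            ((pvTokens raw default).contains "brave")))
  rw [h]
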